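-- pv_equiv track=rewrite | github.com/thealper2/codewars-solutions | 7-kyu/3_powers_of_2.py | three_powers
-- ===== SOURCE A (Python) =====
-- def three_powers(n):
--     if n < 3:
--         return False
--
--     count = 0
--     while n > 0:
--         if n % 2 == 1:
--             count += 1
--         n = n // 2
--     return count <= 3
-- ===== SOURCE B (Python) =====
-- def three_powers(n):
--     if n < 3:
--         return False
--     # Greedy: strip the largest power of 2 at most three times;
--     # n is a sum of at most 3 powers of 2 iff nothing remains.
--     for _ in range(3):
--         if n > 0:
--             n -= 2 ** (n.bit_length() - 1)
--     return n == 0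
-- ===== Notes on version B (the rewrite author's own statement) =====
-- stated objective: alternative
-- what changed: Instead of scanning every bit and counting ones, B greedily subtracts the largest power of two at most three fixed times and tests whether the residue is zero (no counter, no per-bit loop).
import Mathlib
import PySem

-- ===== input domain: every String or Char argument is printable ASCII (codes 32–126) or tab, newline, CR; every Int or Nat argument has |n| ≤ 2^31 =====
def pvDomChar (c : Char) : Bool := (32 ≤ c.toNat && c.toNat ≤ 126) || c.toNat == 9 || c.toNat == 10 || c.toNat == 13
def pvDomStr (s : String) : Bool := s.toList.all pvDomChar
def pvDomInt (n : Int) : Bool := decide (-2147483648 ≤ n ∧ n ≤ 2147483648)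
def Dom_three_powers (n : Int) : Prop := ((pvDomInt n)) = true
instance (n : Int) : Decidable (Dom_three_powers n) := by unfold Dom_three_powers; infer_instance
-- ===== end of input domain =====

-- B greedily subtracts the largest power of two at most three times and tests the residue for zero, instead of A's per-bit counting loop; objective: alternative.


-- ===== PORT A =====
-- A's loop: while n > 0: if n % 2 == 1: count += 1; n = n // 2
def threePowersLoopA (n : Int) (count : Int) : Int :=
  if _h : 0 < n then
    threePowersLoopA (PySem.Int.floordiv n 2)
      (if PySem.Int.mod n 2 = 1 then count + 1 else count)
  else count
termination_by n.toNat
decreasing_by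
  rw [PySem.Int.floordiv_eq_ediv_of_pos (by omega)]; omega

def three_powers (n : Int) : Bool :=
  if n < 3 then false
  else decide (threePowersLoopA n 0 ≤ 3)

-- ===== PORT B =====
-- B's loop body: if n > 0: n -= 2 ** (n.bit_length() - 1)
def threePowersStepB (m : Int) : Int :=
  if 0 < m then m - 2 ^ (PySem.Int.bitLength m - 1) else m

def three_powers_alt (n : Int) : Bool :=
  if n < 3 then false
  else
    -- for _ in range(3): …
    decide ((PySem.List.pyRange 0 3 1).foldl (fun m _ => threePowersStepB m) n = 0)

-- ===== PRECONDITION & SPEC =====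
def Spec_three_powers (n : Int) (out : Bool) : Prop := out = three_powers_alt n
instance (n : Int) (out : Bool) : Decidable (Spec_three_powers n out) := by unfold Spec_three_powers; infer_instance

-- ===== CLAIM (what is proved, stated in full; the proofs are below) =====
def Claim_equal_three_powers : Prop := ∀ (n : Int), Dom_three_powers n → Spec_three_powers n (three_powers n)

-- ===== LEMMAS AND PROOFS =====

-- Nat-valued popcount via PySem
def pvBC (m : Nat) : Nat := PySem.Int.bitCount (m : Int)

theorem pvBC_pos (m : Nat) (h : 0 < m) : 0 < pvBC m := by
  induction m using Nat.strong_induction_on with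
  | _ m ih =>
    have hc := PySem.Int.bitCount_natCast (m := m) h
    by_cases hp : m % 2 = 1
    · unfold pvBC; rw [hc, hp]; omega
    · have h2 : 2 ≤ m := by omega
      have := ih (m / 2) (by omega) (by omega)
      unfold pvBC at *; rw [hc]; omega

theorem pvBC_zero_iff (m : Nat) : pvBC m = 0 ↔ m = 0 := by
  constructor
  · intro h
    by_contra hm
    have := pvBC_pos m (by omega)
    omega
  · intro h; subst h; decide

-- the Nat-level greedy step
def pvStepN (m : Nat) : Nat := m - 2 ^ (PySem.Int.bitLength (m : Int) - 1)

-- stripping the top set bit lowers popcount by exactly one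
theorem pvBC_step (m : Nat) : pvBC (pvStepN m) = pvBC m - 1 := by
  induction m using Nat.strong_induction_on with
  | _ m ih =>
    rcases Nat.lt_or_ge m 2 with h1 | h1
    · interval_cases m <;> decide
    · -- m ≥ 2
      have hL := PySem.Int.bitLength_natCast (m := m) (by omega)
      have hL2 := PySem.Int.two_pow_bitLength_le (n := (m : Int)) (by exact_mod_cast (by omega : m ≠ 0))
      have hL3 := PySem.Int.lt_two_pow_bitLength (n := (m : Int))
      have hLhalf_pos : 0 < PySem.Int.bitLength ((m / 2 : Nat) : Int) := by
        rw [PySem.Int.bitLength_natCast (by omega)]; omega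
      set L := PySem.Int.bitLength ((m : Int)) with hLdef
      have hLpos : 1 ≤ L - 1 := by omega
      have habs : ((m : Int)).natAbs = m := by simp
      rw [habs] at hL2 hL3
      have hm2 : 2 ^ (L - 1) ≤ m := hL2
      -- the step at m and at m/2
      have hhalfL : PySem.Int.bitLength ((m / 2 : Nat) : Int) = L - 1 := by omega
      have hbcm := PySem.Int.bitCount_natCast (m := m) (by omega)
      set r : Nat := pvStepN m with hrdef
      have hr : r = m - 2 ^ (L - 1) := rfl
      have hr2 : r / 2 = m / 2 - 2 ^ (L - 1 - 1) := by
        have hpow : 2 ^ (L - 1) = 2 * 2 ^ (L - 1 - 1) := by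
          rw [← pow_succ']
          congr 1; omega
        omega
      have hstep_half : pvStepN (m / 2) = m / 2 - 2 ^ (L - 1 - 1) := by
        unfold pvStepN; rw [hhalfL]
      have ihh := ih (m / 2) (by omega)
      rw [hstep_half] at ihh
      have hbc_half_pos : 0 < pvBC (m / 2) := pvBC_pos (m / 2) (by omega)
      -- parity of r equals parity of m (2^(L-1) is even since L-1 ≥ 1)
      have hpow_even : 2 ^ (L - 1) % 2 = 0 := by
        have hpow : 2 ^ (L - 1) = 2 * 2 ^ (L - 1 - 1) := by
          rw [← pow_succ']; congr 1; omega
        omega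
      rcases Nat.eq_zero_or_pos r with hr0 | hrpos
      · -- m = 2^(L-1); then m/2 strips to 0, so pvBC (m/2) = 1, pvBC m = 1
        have hm_eq : m = 2 ^ (L - 1) := by omega
        have hhalf0 : m / 2 - 2 ^ (L - 1 - 1) = 0 := by
          have hpow : 2 ^ (L - 1) = 2 * 2 ^ (L - 1 - 1) := by
            rw [← pow_succ']; congr 1; omega
          omega
        rw [hhalf0] at ihh
        have : pvBC 0 = 0 := by decide
        have hbc_half : pvBC (m / 2) = 1 := by omega
        have hmeven : m % 2 = 0 := by omega
        have hbcm1 : pvBC m = 1 := by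
          unfold pvBC
          rw [hbcm, hmeven]
          unfold pvBC at hbc_half
          omega
        rw [hr0, hbcm1]; decide
      · -- r > 0
        have hbcr := PySem.Int.bitCount_natCast (m := r) hrpos
        have hrpar : r % 2 = m % 2 := by omega
        have hrhalf : r / 2 = m / 2 - 2 ^ (L - 1 - 1) := hr2
        unfold pvBC
        rw [hbcr, hbcm, hrpar, hrhalf]
        have : pvBC (m / 2 - 2 ^ (L - 1 - 1)) = pvBC (m / 2) - 1 := ihh
        unfold pvBC at this hbc_half_pos
        omega

-- Int/Nat bridge for the port's step
theorem pvStep_cast (m : Nat) : threePowersStepB (m : Int) = ((pvStepN m : Nat) : Int) := by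
  unfold threePowersStepB pvStepN
  rcases Nat.eq_zero_or_pos m with h0 | h0
  · subst h0; decide
  · rw [if_pos (by exact_mod_cast h0)]
    have hle := PySem.Int.two_pow_bitLength_le (n := (m : Int))
      (by exact_mod_cast (by omega : m ≠ 0))
    have habs : ((m : Int)).natAbs = m := by simp
    rw [habs] at hle
    push_cast [Nat.cast_sub hle]
    ring

-- A's loop computes count + popcount
theorem pv_loopA (n : Nat) : ∀ count : Int,
    threePowersLoopA (n : Int) count = count + (pvBC n : Int) := by
  induction n using Nat.strong_induction_on with
  | _ n ih =>
    intro count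
    rw [threePowersLoopA]
    rcases Nat.eq_zero_or_pos n with h0 | h0
    · subst h0; norm_num [pvBC]
    · have hpos : (0 : Int) < (n : Int) := by exact_mod_cast h0
      rw [dif_pos hpos]
      have hf : PySem.Int.floordiv (n : Int) 2 = ((n / 2 : Nat) : Int) := by
        exact_mod_cast PySem.Int.floordiv_natCast n 2
      have hm : PySem.Int.mod (n : Int) 2 = ((n % 2 : Nat) : Int) := by
        exact_mod_cast PySem.Int.mod_natCast n 2
      have hc := PySem.Int.bitCount_natCast (m := n) (by omega)
      rw [hf, hm, ih (n / 2) (by omega) _]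
      unfold pvBC
      by_cases hpar : n % 2 = 1
      · rw [if_pos (by exact_mod_cast hpar), hc, hpar]; push_cast; ring
      · have : n % 2 = 0 := by omega
        rw [if_neg (by rw [this]; decide), hc, this]; push_cast; ring

-- three greedy steps leave zero iff popcount ≤ 3
theorem pv_greedy3 (n : Nat) :
    (pvStepN (pvStepN (pvStepN n)) = 0) ↔ pvBC n ≤ 3 := by
  have h1 := pvBC_step n
  have h2 := pvBC_step (pvStepN n)
  have h3 := pvBC_step (pvStepN (pvStepN n))
  constructor
  · intro h
    have : pvBC (pvStepN (pvStepN (pvStepN n))) = 0 := by rw [h]; decide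
    omega
  · intro h
    have : pvBC (pvStepN (pvStepN (pvStepN n))) = 0 := by omega
    exact (pvBC_zero_iff _).mp this

-- ===== VERDICT (by name: the statement is the Claim_ definition above) =====
theorem three_powers_spec : Claim_equal_three_powers := by
  intro n _
  unfold Spec_three_powers three_powers three_powers_alt
  by_cases h : n < 3
  · rw [if_pos h, if_pos h]
  · rw [if_neg h, if_neg h]
    have hn : ((n.toNat : Nat) : Int) = n := Int.toNat_of_nonneg (by omega)
    have hrange : PySem.List.pyRange 0 3 1 = [0, 1, 2] := by decide
    have ha := pv_loopA n.toNat 0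
    rw [hn] at ha
    rw [ha, hrange]
    simp only [List.foldl]
    rw [decide_eq_decide]
    have hfold : threePowersStepB (threePowersStepB (threePowersStepB n))
        = ((pvStepN (pvStepN (pvStepN n.toNat)) : Nat) : Int) := by
      rw [← hn, pvStep_cast, pvStep_cast, pvStep_cast, Int.toNat_natCast]
    rw [hfold, Nat.cast_eq_zero, pv_greedy3]
    omega
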